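-- pv_equiv track=rewrite | github.com/nhatnxn/thalas | etc/ThalasOCR/utils/table_extraction.py | get_col_dict
-- ===== SOURCE A (Python) =====
-- from collections import defaultdict
-- import string
--
-- def get_col_dict(list_cell, max_columns=0):
--     '''
--     return col_dict = {'A': 51, 'B': 334, 'C': 1064}
--     '''
--     col_dict = defaultdict()
--     col_count = 0
--     list_cell = sorted(list_cell, key=lambda k: [k[0], k[1]])
--     for i in range(len(list_cell)-2):
--         x = list_cell[i][0]
--         x_next = list_cell[i+1][0]
--         if x_next-x > 30:
--             col = int((x_next+x)/2)
--             if col_count>25: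
--                 col_dict[string.ascii_uppercase[col_count//26-1]+string.ascii_uppercase[col_count%26-26]] = col
--             else:
--                 col_dict[string.ascii_uppercase[col_count]] = col
--             col_count += 1
--     # #add 1 last col
--     col = int((list_cell[-1][0] + list_cell[-1][2])/2)
--     if col_count>25:
--         col_dict[string.ascii_uppercase[col_count//26-1]+string.ascii_uppercase[col_count%26-26]] = col
--     else:
--         col_dict[string.ascii_uppercase[col_count]] = col
--
--     ks = col_dict.keys()
--     if max_columns > 0 and len(ks) > max_columns:
--         filtered_col_dict = {}
--         for i, k in enumerate(ks):
--             if i < max_columns: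
--                 filtered_col_dict[k] = col_dict[k]
--
--         col_dict= filtered_col_dict
--
--     return col_dict
-- ===== SOURCE B (Python) =====
-- def get_col_dict(list_cell, max_columns=0):
--     '''
--     return col_dict = {'A': 51, 'B': 334, 'C': 1064}
--     '''
--     cells = sorted(list_cell, key=lambda k: [k[0], k[1]])
--
--     def letter(i):
--         # spreadsheet letter for column index i, by character arithmetic
--         if i > 25:
--             return chr(64 + i // 26) + chr(65 + i % 26)
--         return chr(65 + i)
--
--     def columns(i, idx):
--         # scan forward from pair i for the next separating gap; one recursive
--         # call per column found, emitting (letter, midpoint) pairs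
--         j = i
--         while j < len(cells) - 2:
--             if cells[j + 1][0] - cells[j][0] > 30:
--                 mid = int((cells[j][0] + cells[j + 1][0]) / 2)
--                 return [(letter(idx), mid)] + columns(j + 1, idx + 1)
--             j += 1
--         return [(letter(idx), int((cells[-1][0] + cells[-1][2]) / 2))]
--
--     pairs = columns(0, 0)
--     if max_columns > 0 and len(pairs) > max_columns:
--         pairs = pairs[:max_columns]
--     return dict(pairs)
-- ===== Notes on version B (the rewrite author's own statement) =====
-- stated objective: alternative
-- what changed: B replaces A's flat index loop with dict insertion, a mutated letter counter and a post-hoc dict-filtering pass by a recursive column finder: each recursive call scans forward to the next separating gap and emits one (letter, midpoint) pair (letters computed by chr arithmetic instead of string.ascii_uppercase indexing), the pair list is truncated before any dict exists, and the dict is built last from the finished pairs.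
import Mathlib
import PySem

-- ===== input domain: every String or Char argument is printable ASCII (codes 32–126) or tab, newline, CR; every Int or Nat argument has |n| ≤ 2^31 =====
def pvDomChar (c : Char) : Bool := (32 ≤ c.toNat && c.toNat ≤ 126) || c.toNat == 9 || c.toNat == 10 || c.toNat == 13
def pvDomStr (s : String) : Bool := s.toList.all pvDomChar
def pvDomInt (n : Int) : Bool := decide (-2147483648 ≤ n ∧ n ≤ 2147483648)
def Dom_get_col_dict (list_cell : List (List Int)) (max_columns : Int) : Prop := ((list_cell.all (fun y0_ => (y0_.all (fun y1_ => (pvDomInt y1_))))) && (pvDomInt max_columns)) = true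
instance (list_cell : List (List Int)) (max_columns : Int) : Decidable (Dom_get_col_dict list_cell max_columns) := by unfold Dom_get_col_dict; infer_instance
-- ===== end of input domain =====

-- B re-implements get_col_dict as a recursive column finder: each call scans forward to
-- the next separating gap and emits one (letter, midpoint) pair (letters by chr
-- arithmetic), the pair list is truncated before any dict exists, and the dict is built
-- last; A runs a flat index loop with dict insertion, a mutated letter counter and a
-- post-hoc dict-filtering pass. Same return value on every input admitted by Pre_
-- (objective: alternative decomposition, no speed claim).

-- ===== PORT A =====
-- A indexes string.ascii_uppercase with col_count//26-1 and col_count%26-26 (the latter a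
-- negative Python index) and sorts with key [k[0], k[1]].  int((a+b)/2) is exact as Int
-- truncdiv here: the domain bounds |coords| ≤ 2^31, so the float true division is exact.
-- The pyGetD defaults are unreachable under Pre_ (indices in range, key index ≤ 701).
def pyUpper : List Char := "ABCDEFGHIJKLMNOPQRSTUVWXYZ".toList

def colKey (cc : Int) : String :=
  if cc > 25 then
    String.ofList [PySem.List.pyGetD pyUpper (PySem.Int.floordiv cc 26 - 1) 'A',
                   PySem.List.pyGetD pyUpper (PySem.Int.mod cc 26 - 26) 'A']
  else
    String.ofList [PySem.List.pyGetD pyUpper cc 'A']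

def sortCells (list_cell : List (List Int)) : List (List Int) :=
  PySem.List.sorted2 list_cell (fun k => PySem.List.pyGetD k 0 0) (fun k => PySem.List.pyGetD k 1 0)

def get_col_dict (list_cell : List (List Int)) (max_columns : Int) : List (String × Int) :=
  let lc := sortCells list_cell
  let st := (PySem.List.pyRange 0 ((lc.length : Int) - 2) 1).foldl
    (fun (st : PySem.Dict String Int × Int) i =>
      let x := PySem.List.pyGetD (PySem.List.pyGetD lc i []) 0 0
      let x_next := PySem.List.pyGetD (PySem.List.pyGetD lc (i + 1) []) 0 0
      if x_next - x > 30 then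
        (st.1.insert (colKey st.2) (PySem.Int.truncdiv (x_next + x) 2), st.2 + 1)
      else st)
    (PySem.Dict.empty, (0 : Int))
  let lastCell := PySem.List.pyGetD lc (-1) []
  let col := PySem.Int.truncdiv (PySem.List.pyGetD lastCell 0 0 + PySem.List.pyGetD lastCell 2 0) 2
  let d := st.1.insert (colKey st.2) col
  let ks := d.keys
  if max_columns > 0 ∧ (ks.length : Int) > max_columns then
    ((PySem.List.enumerate ks).foldl
      (fun (fd : PySem.Dict String Int) p =>
        if p.1 < max_columns then fd.insert p.2 (d.getD p.2 0) else fd)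
      PySem.Dict.empty).items
  else d.items

-- ===== PORT B =====
-- letter(i): the spreadsheet letters by chr arithmetic (chr = Char.ofNat on this range)
def bkey (i : Int) : String :=
  if i > 25 then
    String.ofList [Char.ofNat (64 + PySem.Int.floordiv i 26).toNat,
                   Char.ofNat (65 + PySem.Int.mod i 26).toNat]
  else
    String.ofList [Char.ofNat (65 + i).toNat]

-- columns(i, idx): the while loop advancing j and the recursive return are one recursion
-- here (each step either emits a pair at a gap, or moves on); same scan order and values.
def columnsGo (cells : List (List Int)) (j : Nat) (idx : Int) : List (String × Int) :=
  if h : j < cells.length - 2 then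
    if PySem.List.pyGetD (PySem.List.pyGetD cells ((j : Int) + 1) []) 0 0
        - PySem.List.pyGetD (PySem.List.pyGetD cells (j : Int) []) 0 0 > 30 then
      (bkey idx,
        PySem.Int.truncdiv (PySem.List.pyGetD (PySem.List.pyGetD cells (j : Int) []) 0 0
          + PySem.List.pyGetD (PySem.List.pyGetD cells ((j : Int) + 1) []) 0 0) 2)
        :: columnsGo cells (j + 1) (idx + 1)
    else columnsGo cells (j + 1) idx
  else
    [(bkey idx,
      PySem.Int.truncdiv (PySem.List.pyGetD (PySem.List.pyGetD cells (-1) []) 0 0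
        + PySem.List.pyGetD (PySem.List.pyGetD cells (-1) []) 2 0) 2)]
termination_by cells.length - j
decreasing_by all_goals omega

def get_col_dict_alt (list_cell : List (List Int)) (max_columns : Int) : List (String × Int) :=
  let cells := sortCells list_cell
  let pairs := columnsGo cells 0 0
  let pairs := if max_columns > 0 ∧ (pairs.length : Int) > max_columns
    then PySem.List.slice pairs none (some max_columns) else pairs
  (pairs.foldl (fun (d : PySem.Dict String Int) p => d.insert p.1 p.2) PySem.Dict.empty).items

-- ===== PRECONDITION & SPEC =====
-- Pre_ excludes exactly the inputs on which Python A raises IndexError: the empty list,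
-- cells with fewer than 2 entries, a last-sorted cell with fewer than 3 entries, and inputs
-- whose sorted cells show more than 701 separating gaps (> 30) — there A runs out of
-- two-letter column names (string.ascii_uppercase[702//26-1] raises).
def Pre_get_col_dict (list_cell : List (List Int)) (max_columns : Int) : Prop :=
  list_cell ≠ [] ∧ (∀ c ∈ list_cell, 2 ≤ c.length) ∧
  3 ≤ ((sortCells list_cell).getLastD []).length ∧
  ((PySem.List.pyRange 0 (((sortCells list_cell).length : Int) - 2) 1).filter (fun i =>
      decide (PySem.List.pyGetD (PySem.List.pyGetD (sortCells list_cell) (i + 1) []) 0 0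
        - PySem.List.pyGetD (PySem.List.pyGetD (sortCells list_cell) i []) 0 0 > 30))).length ≤ 701

instance (list_cell : List (List Int)) (max_columns : Int) : Decidable (Pre_get_col_dict list_cell max_columns) := by
  unfold Pre_get_col_dict; infer_instance

def pvWitness_get_col_dict : List (List Int) × Int := ([[0, 0, 10], [100, 0, 160]], 0)

def Spec_get_col_dict (list_cell : List (List Int)) (max_columns : Int) (out : List (String × Int)) : Prop :=
  out = get_col_dict_alt list_cell max_columns
instance (list_cell : List (List Int)) (max_columns : Int) (out : List (String × Int)) : Decidable (Spec_get_col_dict list_cell max_columns out) := by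
  unfold Spec_get_col_dict; infer_instance

-- ===== CLAIM (what is proved, stated in full; the proofs are below) =====
def Claim_equal_get_col_dict : Prop := ∀ (list_cell : List (List Int)) (max_columns : Int), Dom_get_col_dict list_cell max_columns → Pre_get_col_dict list_cell max_columns → Spec_get_col_dict list_cell max_columns (get_col_dict list_cell max_columns)

-- ===== LEMMAS AND PROOFS =====
theorem upper_getD : ∀ j : Nat, j < 26 → (PySem.List.pyGetD pyUpper (j : Int) 'A') = Char.ofNat (65 + j) := by decide

theorem upper_neg : ∀ j : Nat, j < 27 → (0 < j → (PySem.List.pyGetD pyUpper (-(j : Int)) 'A') = Char.ofNat (65 + (26 - j))) := by decide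

theorem charToNat (n : Nat) (h : n < 1000) : (Char.ofNat n).toNat = n := by
  simp [Char.toNat_ofNat, Nat.isValidChar]
  omega

theorem bkey_eq_colKey (k : Nat) (hk : k < 702) : bkey (k : Int) = colKey (k : Int) := by
  unfold bkey colKey
  by_cases h : (k : Int) > 25
  · have h26 : 26 ≤ k := by omega
    have e1 : PySem.Int.floordiv (k : Int) 26 - 1 = ((k / 26 - 1 : Nat) : Int) := by
      rw [show (26:Int) = ((26:Nat):Int) from rfl, PySem.Int.floordiv_natCast]; omega
    have e2 : PySem.Int.mod (k : Int) 26 - 26 = -(((26 - k % 26 : Nat)) : Int) := by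
      rw [show (26:Int) = ((26:Nat):Int) from rfl, PySem.Int.mod_natCast]
      have := Nat.mod_lt k (show 0 < 26 by omega); omega
    have e3 : (64 + PySem.Int.floordiv (k : Int) 26).toNat = 65 + (k / 26 - 1) := by
      rw [show (26:Int) = ((26:Nat):Int) from rfl, PySem.Int.floordiv_natCast]
      have : 1 ≤ k / 26 := by omega
      omega
    have e4 : (65 + PySem.Int.mod (k : Int) 26).toNat = 65 + k % 26 := by
      rw [show (26:Int) = ((26:Nat):Int) from rfl, PySem.Int.mod_natCast]; omega
    rw [if_pos h, if_pos h, e1, e2, e3, e4,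
      upper_getD (k / 26 - 1) (by omega),
      upper_neg (26 - k % 26) (by have := Nat.mod_lt k (show 0 < 26 by omega); omega)
        (by have := Nat.mod_lt k (show 0 < 26 by omega); omega)]
    have hm := Nat.mod_lt k (show 0 < 26 by omega)
    rw [show 26 - (26 - k % 26) = k % 26 from by omega]
  · have e5 : (65 + (k : Int)).toNat = 65 + k := by omega
    rw [if_neg h, if_neg h, e5, upper_getD k (by omega)]

def decodeKey (s : String) : Int :=
  match s.toList with
  | [a] => (a.toNat : Int) - 65
  | [a, b] => 26 * ((a.toNat : Int) - 64) + ((b.toNat : Int) - 65)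
  | _ => -1

theorem colKey_decode (k : Nat) (hk : k < 702) : decodeKey (colKey (k : Int)) = (k : Int) := by
  unfold colKey decodeKey
  by_cases h : (k : Int) > 25
  · have h26 : 26 ≤ k := by omega
    have e1 : PySem.Int.floordiv (k : Int) 26 - 1 = ((k / 26 - 1 : Nat) : Int) := by
      rw [show (26:Int) = ((26:Nat):Int) from rfl, PySem.Int.floordiv_natCast]; omega
    have e2 : PySem.Int.mod (k : Int) 26 - 26 = -(((26 - k % 26 : Nat)) : Int) := by
      rw [show (26:Int) = ((26:Nat):Int) from rfl, PySem.Int.mod_natCast]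
      have := Nat.mod_lt k (show 0 < 26 by omega); omega
    rw [if_pos h, e1, e2]
    simp only [String.toList_ofList]
    have := Nat.mod_lt k (show 0 < 26 by omega)
    rw [upper_getD (k / 26 - 1) (by omega),
      upper_neg (26 - k % 26) (by omega) (by omega)]
    rw [charToNat _ (by omega), charToNat _ (by omega)]
    have hdm := Nat.div_add_mod k 26
    push_cast
    omega
  · rw [if_neg h]
    simp only [String.toList_ofList]
    rw [upper_getD k (by omega)]
    rw [charToNat _ (by omega)]
    omega

theorem colKey_inj (i j : Nat) (hi : i < 702) (hj : j < 702) (h : colKey i = colKey j) : i = j := by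
  have := colKey_decode i hi
  rw [h, colKey_decode j hj] at this
  omega

theorem colKey_int_inj (i j : Int) (hi0 : 0 ≤ i) (hi : i < 702) (hj0 : 0 ≤ j) (hj : j < 702)
    (h : colKey i = colKey j) : i = j := by
  have := colKey_inj i.toNat j.toNat (by omega) (by omega)
    (by rwa [Int.toNat_of_nonneg hi0, Int.toNat_of_nonneg hj0])
  omega

-- the column centers that positions ≥ a of the sorted cells contribute, and the last one
def centersFrom (s : List (List Int)) (a : Int) : List Int :=
  ((PySem.List.pyRange a ((s.length : Int) - 2) 1).filter (fun i =>
      decide (PySem.List.pyGetD (PySem.List.pyGetD s (i + 1) []) 0 0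
        - PySem.List.pyGetD (PySem.List.pyGetD s i []) 0 0 > 30))).map
    (fun i => PySem.Int.truncdiv
      (PySem.List.pyGetD (PySem.List.pyGetD s i []) 0 0
        + PySem.List.pyGetD (PySem.List.pyGetD s (i + 1) []) 0 0) 2)

def lastCenter (s : List (List Int)) : Int :=
  PySem.Int.truncdiv (PySem.List.pyGetD (PySem.List.pyGetD s (-1) []) 0 0
    + PySem.List.pyGetD (PySem.List.pyGetD s (-1) []) 2 0) 2

def fullCols (s : List (List Int)) : List Int := centersFrom s 0 ++ [lastCenter s]

theorem centersFrom_nil_of_ge (s : List (List Int)) (j : Nat) (h : ¬ j < s.length - 2) :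
    centersFrom s (j : Int) = [] := by
  unfold centersFrom
  have : (PySem.List.pyRange (j : Int) ((s.length : Int) - 2) 1).length = 0 := by
    rw [PySem.List.length_pyRange_one]; omega
  rw [List.eq_nil_of_length_eq_zero this]
  rfl

theorem columnsGo_eq (s : List (List Int)) (j : Nat) (idx : Int) :
    columnsGo s j idx
      = (PySem.List.enumerate (centersFrom s (j : Int)) idx).map (fun p => (bkey p.1, p.2))
        ++ [(bkey (idx + ((centersFrom s (j : Int)).length : Int)), lastCenter s)] := by
  by_cases h : j < s.length - 2
  · have hlt : (j : Int) < (s.length : Int) - 2 := by omega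
    have hcons := PySem.List.pyRange_one_cons (a := (j : Int)) (b := ((s.length : Int) - 2)) hlt
    have hstep : centersFrom s ((j : Int) + 1) = centersFrom s (((j + 1 : Nat)) : Int) := by
      push_cast; ring_nf
    rw [columnsGo]
    rw [dif_pos h]
    unfold centersFrom
    rw [hcons, List.filter_cons]
    by_cases hg : PySem.List.pyGetD (PySem.List.pyGetD s ((j : Int) + 1) []) 0 0
        - PySem.List.pyGetD (PySem.List.pyGetD s (j : Int) []) 0 0 > 30
    · rw [if_pos hg, if_pos (by simpa using hg)]
      rw [List.map_cons, PySem.List.enumerate_cons, List.map_cons]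
      have ih := columnsGo_eq s (j + 1) (idx + 1)
      rw [ih, ← hstep]
      unfold centersFrom
      simp only [List.cons_append, List.length_cons]
      push_cast
      ring_nf
    · rw [if_neg hg, if_neg (by simpa using hg)]
      have ih := columnsGo_eq s (j + 1) idx
      rw [ih, ← hstep]
      rfl
  · rw [columnsGo, dif_neg h, centersFrom_nil_of_ge s j h]
    simp [PySem.List.enumerate_nil, lastCenter]
termination_by s.length - j
decreasing_by all_goals omega

theorem take_enumerate {α : Type} (xs : List α) (s : Int) (m : Nat) :
    (PySem.List.enumerate xs s).take m = PySem.List.enumerate (xs.take m) s := by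
  induction xs generalizing s m with
  | nil => simp [PySem.List.enumerate_nil]
  | cons x xs ih =>
    cases m with
    | zero => simp [PySem.List.enumerate_nil]
    | succ m => simp [PySem.List.enumerate_cons, ih]

-- ===== A-side machinery (A's dict as dictOf over the centers list) =====
def dictOf (L : List Int) : PySem.Dict String Int :=
  (PySem.List.enumerate L).foldl (fun (r : PySem.Dict String Int) p => r.insert (colKey p.1) p.2) PySem.Dict.empty

theorem dictOf_snoc (L : List Int) (c : Int) :
    dictOf (L ++ [c]) = (dictOf L).insert (colKey (L.length : Int)) c := by
  simp [dictOf, PySem.List.enumerate_append, PySem.List.enumerate_cons, PySem.List.enumerate_nil]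

theorem Afold (cs L : List Int) :
    cs.foldl (fun (st : PySem.Dict String Int × Int) c => (st.1.insert (colKey st.2) c, st.2 + 1))
      (dictOf L, (L.length : Int))
    = (dictOf (L ++ cs), ((L.length + cs.length : Nat) : Int)) := by
  induction cs generalizing L with
  | nil => simp
  | cons c cs ih =>
    rw [List.foldl_cons]
    have : ((dictOf L).insert (colKey (L.length : Int)) c, (L.length : Int) + 1)
        = (dictOf (L ++ [c]), (((L ++ [c]).length : Nat) : Int)) := by
      rw [dictOf_snoc]; simp
    rw [this, ih]
    simp [List.append_assoc]
    omega

theorem keys_dictOf_nodup (L : List Int) (h : L.length ≤ 702) :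
    (((PySem.List.enumerate L).map (fun p => colKey p.1))).Nodup := by
  have e : (PySem.List.enumerate L).map (fun p => colKey p.1)
      = ((PySem.List.enumerate L).map (·.1)).map colKey := by
    rw [List.map_map]; rfl
  rw [e, PySem.List.map_fst_enumerate]
  refine List.Nodup.map_on ?_ (PySem.List.nodup_pyRange_one 0 (0 + (L.length : Int)))
  intro x hx y hy hxy
  rw [PySem.List.mem_pyRange_one] at hx hy
  simp at hx hy
  exact colKey_int_inj x y hx.1 (by omega) hy.1 (by omega) hxy

theorem items_dictOf (L : List Int) (h : L.length ≤ 702) :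
    (dictOf L).items = (PySem.List.enumerate L).map (fun p => (colKey p.1, p.2)) := by
  rw [dictOf, PySem.Dict.items_foldl_insert_fresh]
  · simp [PySem.Dict.empty]
  · intro a _; exact PySem.Dict.contains_empty _
  · exact keys_dictOf_nodup L h

theorem filter_enumerate {α : Type} (xs : List α) (s : Int) (m : Nat) :
    (PySem.List.enumerate xs s).filter (fun p => decide (p.1 < s + (m : Int)))
      = PySem.List.enumerate (xs.take m) s := by
  induction xs generalizing s m with
  | nil => simp [PySem.List.enumerate_nil]
  | cons x xs ih =>
    cases m with
    | zero =>
      simp only [List.take_zero, PySem.List.enumerate_nil, PySem.List.enumerate_cons]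
      rw [List.filter_eq_nil_iff]
      intro p hp
      rcases List.mem_cons.mp hp with h | h
      · subst h; simp
      · rw [PySem.List.mem_enumerate_iff] at h
        obtain ⟨k, hk, rfl⟩ := h
        simp; omega
    | succ m =>
      simp only [PySem.List.enumerate_cons, List.take_succ_cons, List.filter_cons]
      have hx : (decide ((s, x).1 < s + ((m + 1 : Nat) : Int))) = true := by simp
      rw [hx]
      have e : (fun (p : Int × α) => decide (p.1 < s + ((m + 1 : Nat) : Int)))
          = (fun (p : Int × α) => decide (p.1 < (s + 1) + (m : Int))) := by
        funext p; congr 1; push_cast; ring_nf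
      rw [e, ih]
      simp

theorem nodup_map_colKey_range (b : Nat) (hb : b ≤ 702) :
    ((PySem.List.pyRange 0 (b : Int) 1).map colKey).Nodup := by
  refine List.Nodup.map_on ?_ (PySem.List.nodup_pyRange_one 0 (b : Int))
  intro x hx y hy hxy
  rw [PySem.List.mem_pyRange_one] at hx hy
  exact colKey_int_inj x y hx.1 (by omega) hy.1 (by omega) hxy

theorem keys_dictOf (F : List Int) (h : F.length ≤ 702) :
    (dictOf F).keys = (PySem.List.pyRange 0 (F.length : Int) 1).map colKey := by
  have : (dictOf F).keys = (dictOf F).items.map (·.1) := rfl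
  rw [this, items_dictOf F h, List.map_map]
  have : (PySem.List.enumerate F).map ((fun (p : String × Int) => p.1) ∘ fun p => (colKey p.1, p.2))
      = ((PySem.List.enumerate F).map (·.1)).map colKey := by
    rw [List.map_map]; rfl
  rw [this, PySem.List.map_fst_enumerate]
  norm_num

theorem getD_dictOf (F : List Int) (k : Nat) (h : F.length ≤ 702) (hk : k < F.length) :
    (dictOf F).getD (colKey (k : Int)) 0 = F[k] := by
  apply PySem.Dict.getD_of_mem_items
  · rw [items_dictOf F h]
    have : ((PySem.List.enumerate F).map (fun p => (colKey p.1, p.2)))[k]'(by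
        simp [PySem.List.length_enumerate, hk]) = (colKey (k : Int), F[k]) := by
      rw [List.getElem_map, PySem.List.getElem_enumerate]
      simp
    rw [← this]
    exact List.getElem_mem _
  · rw [keys_dictOf F h]
    exact nodup_map_colKey_range F.length h

theorem filtered_items (F : List Int) (mc : Int) (hF : F.length ≤ 702) (h0 : 0 < mc)
    (hlt : mc < (F.length : Int)) :
    ((PySem.List.enumerate ((dictOf F).keys)).foldl
      (fun (fd : PySem.Dict String Int) p =>
        if p.1 < mc then fd.insert p.2 ((dictOf F).getD p.2 0) else fd)
      PySem.Dict.empty).items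
    = (dictOf (F.take mc.toNat)).items := by
  have hm : mc = (0 : Int) + ((mc.toNat : Nat) : Int) := by omega
  have hmF : mc.toNat < F.length := by omega
  have hm702 : mc.toNat ≤ 702 := by omega
  rw [PySem.List.foldl_ite_eq_foldl_filter]
  have epred : (fun (p : Int × String) => decide (p.1 < mc))
      = fun (p : Int × String) => decide (p.1 < (0 : Int) + ((mc.toNat : Nat) : Int)) := by
    funext p; rw [← hm]
  rw [epred, filter_enumerate]
  have hsplit : PySem.List.pyRange 0 (F.length : Int) 1
      = PySem.List.pyRange 0 ((mc.toNat : Nat) : Int) 1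
        ++ PySem.List.pyRange ((mc.toNat : Nat) : Int) (F.length : Int) 1 :=
    PySem.List.pyRange_one_append 0 _ _ (by omega) (by omega)
  have hlen1 : ((PySem.List.pyRange 0 ((mc.toNat : Nat) : Int) 1).map colKey).length = mc.toNat := by
    rw [List.length_map, PySem.List.length_pyRange_one]; omega
  have htake : ((dictOf F).keys).take mc.toNat
      = (PySem.List.pyRange 0 ((mc.toNat : Nat) : Int) 1).map colKey := by
    rw [keys_dictOf F hF, hsplit, List.map_append, List.take_left' hlen1]
  rw [htake]
  rw [PySem.Dict.items_foldl_insert_fresh _ _ _ _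
    (by intro a _; exact PySem.Dict.contains_empty _)
    (by rw [PySem.List.map_snd_enumerate]; exact nodup_map_colKey_range mc.toNat hm702)]
  rw [items_dictOf _ (by rw [List.length_take]; omega)]
  have hlempty : PySem.Dict.empty.items = ([] : List (String × Int)) := rfl
  rw [hlempty, List.nil_append]
  apply List.ext_getElem
  · simp [PySem.List.length_enumerate, List.length_take]
    omega
  · intro k hk1 hk2
    have hkm : k < mc.toNat := by
      simp [PySem.List.length_enumerate] at hk1; omega
    rw [List.getElem_map, List.getElem_map, PySem.List.getElem_enumerate,
      PySem.List.getElem_enumerate]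
    simp only [List.getElem_map, PySem.List.getElem_pyRange_one, List.getElem_take]
    have h0k : (0 : Int) + (k : Int) = (k : Int) := by omega
    rw [h0k, getD_dictOf F k hF (by omega)]

-- A's result as the enumerate-map normal form
theorem A_eq (lc : List (List Int)) (mc : Int)
    (hcnt : ((PySem.List.pyRange 0 (((sortCells lc).length : Int) - 2) 1).filter (fun i =>
      decide (PySem.List.pyGetD (PySem.List.pyGetD (sortCells lc) (i + 1) []) 0 0
        - PySem.List.pyGetD (PySem.List.pyGetD (sortCells lc) i []) 0 0 > 30))).length ≤ 701) :
    get_col_dict lc mc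
      = (PySem.List.enumerate (if mc > 0 ∧ ((fullCols (sortCells lc)).length : Int) > mc
          then (fullCols (sortCells lc)).take mc.toNat else fullCols (sortCells lc)) 0).map
        (fun p => (colKey p.1, p.2)) := by
  simp only [get_col_dict]
  set s : List (List Int) := sortCells lc with hs
  rw [PySem.List.foldl_ite_eq_foldl_filter]
  rw [← List.foldl_map
    (f := fun i => PySem.Int.truncdiv
      (PySem.List.pyGetD (PySem.List.pyGetD s (i + 1) []) 0 0 + PySem.List.pyGetD (PySem.List.pyGetD s i []) 0 0) 2)
    (g := fun (st : PySem.Dict String Int × Int) c => (st.1.insert (colKey st.2) c, st.2 + 1))]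
  have hinit : ((PySem.Dict.empty : PySem.Dict String Int), (0 : Int))
      = (dictOf [], ((List.length ([] : List Int) : Nat) : Int)) := rfl
  rw [hinit, Afold]
  have hAB : ((PySem.List.pyRange 0 ((s.length : Int) - 2) 1).filter fun i =>
      decide (PySem.List.pyGetD (PySem.List.pyGetD s (i + 1) []) 0 0
        - PySem.List.pyGetD (PySem.List.pyGetD s i []) 0 0 > 30)).map
    (fun i => PySem.Int.truncdiv
      (PySem.List.pyGetD (PySem.List.pyGetD s (i + 1) []) 0 0 + PySem.List.pyGetD (PySem.List.pyGetD s i []) 0 0) 2)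
      = centersFrom s 0 := by
    unfold centersFrom
    apply List.map_congr_left
    intro i _
    congr 1
    ring
  simp only [List.nil_append, List.length_nil, Nat.zero_add, hAB]
  rw [← dictOf_snoc]
  have hFeq : centersFrom s 0 ++ [lastCenter s] = fullCols s := rfl
  have hcl : (centersFrom s 0).length ≤ 701 := by
    unfold centersFrom; rw [List.length_map]; exact hcnt
  rw [show PySem.Int.truncdiv (PySem.List.pyGetD (PySem.List.pyGetD s (-1) []) 0 0
      + PySem.List.pyGetD (PySem.List.pyGetD s (-1) []) 2 0) 2 = lastCenter s from rfl]
  rw [hFeq]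
  set F := fullCols s with hF
  have hFlen : F.length ≤ 702 := by
    rw [hF]; unfold fullCols
    simp only [List.length_append, List.length_singleton]
    omega
  have hkl : (((dictOf F).keys.length : Nat) : Int) = ((F.length : Nat) : Int) := by
    rw [keys_dictOf F hFlen, List.length_map, PySem.List.length_pyRange_one]
    omega
  rw [hkl]
  by_cases hc : mc > 0 ∧ ((F.length : Nat) : Int) > mc
  · rw [if_pos hc, if_pos hc, filtered_items F mc hFlen hc.1 hc.2,
      items_dictOf _ (by rw [List.length_take]; omega)]
  · rw [if_neg hc, if_neg hc, items_dictOf F hFlen]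

-- B-side: the truncated pair list has distinct keys, so the final dict returns it intact
theorem nodup_bkeys (L : List Int) (h : L.length ≤ 702) :
    (((PySem.List.enumerate L).map (fun p => (bkey p.1, p.2))).map (·.1)).Nodup := by
  have e : ((PySem.List.enumerate L).map (fun p => (bkey p.1, p.2))).map (·.1)
      = ((PySem.List.enumerate L).map (·.1)).map bkey := by
    rw [List.map_map, List.map_map]; rfl
  rw [e, PySem.List.map_fst_enumerate]
  refine List.Nodup.map_on ?_ (PySem.List.nodup_pyRange_one 0 (0 + (L.length : Int)))
  intro x hx y hy hxy
  rw [PySem.List.mem_pyRange_one] at hx hy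
  simp at hx hy
  have hx702 : x < 702 := by omega
  have hy702 : y < 702 := by omega
  rw [show x = ((x.toNat : Nat) : Int) by omega, show y = ((y.toNat : Nat) : Int) by omega,
    bkey_eq_colKey x.toNat (by omega), bkey_eq_colKey y.toNat (by omega)] at hxy
  have := colKey_int_inj ((x.toNat : Nat) : Int) ((y.toNat : Nat) : Int)
    (by omega) (by omega) (by omega) (by omega) hxy
  omega

theorem items_bpairs (L : List Int) (h : L.length ≤ 702) :
    (((PySem.List.enumerate L).map (fun p => (bkey p.1, p.2))).foldl
      (fun (d : PySem.Dict String Int) p => d.insert p.1 p.2) PySem.Dict.empty).items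
    = (PySem.List.enumerate L).map (fun p => (bkey p.1, p.2)) := by
  rw [PySem.Dict.items_foldl_insert_fresh _ _ _ _
    (by intro a _; exact PySem.Dict.contains_empty _) (nodup_bkeys L h)]
  have hlempty : PySem.Dict.empty.items = ([] : List (String × Int)) := rfl
  rw [hlempty, List.nil_append]
  simp

theorem B_eq (lc : List (List Int)) (mc : Int)
    (hcnt : ((PySem.List.pyRange 0 (((sortCells lc).length : Int) - 2) 1).filter (fun i =>
      decide (PySem.List.pyGetD (PySem.List.pyGetD (sortCells lc) (i + 1) []) 0 0
        - PySem.List.pyGetD (PySem.List.pyGetD (sortCells lc) i []) 0 0 > 30))).length ≤ 701) :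
    get_col_dict_alt lc mc
      = (PySem.List.enumerate (if mc > 0 ∧ ((fullCols (sortCells lc)).length : Int) > mc
          then (fullCols (sortCells lc)).take mc.toNat else fullCols (sortCells lc)) 0).map
        (fun p => (bkey p.1, p.2)) := by
  simp only [get_col_dict_alt]
  set s : List (List Int) := sortCells lc with hs
  have hcl : (centersFrom s 0).length ≤ 701 := by
    unfold centersFrom; rw [List.length_map]; exact hcnt
  have hFlen : (fullCols s).length ≤ 702 := by
    unfold fullCols
    simp only [List.length_append, List.length_singleton]
    omega
  have hpairs : columnsGo s 0 0
      = (PySem.List.enumerate (fullCols s) 0).map (fun p => (bkey p.1, p.2)) := by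
    have h0 : ((0 : Nat) : Int) = (0 : Int) := rfl
    have := columnsGo_eq s 0 0
    rw [h0] at this
    rw [this]
    unfold fullCols
    rw [PySem.List.enumerate_append, List.map_append, PySem.List.enumerate_cons,
      PySem.List.enumerate_nil, List.map_cons, List.map_nil]
  rw [hpairs]
  have hplen : (((PySem.List.enumerate (fullCols s) 0).map
      (fun p => (bkey p.1, p.2))).length : Int) = ((fullCols s).length : Int) := by
    rw [List.length_map, PySem.List.length_enumerate]
  rw [hplen]
  by_cases hc : mc > 0 ∧ (((fullCols s).length : Nat) : Int) > mc
  · rw [if_pos hc, if_pos hc, PySem.List.slice_to _ (le_of_lt hc.1),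
      ← List.map_take, take_enumerate]
    exact items_bpairs _ (by rw [List.length_take]; omega)
  · rw [if_neg hc, if_neg hc]
    exact items_bpairs _ hFlen

-- ===== VERDICT (by name: the statement is the Claim_ definition above) =====
theorem get_col_dict_spec : Claim_equal_get_col_dict := by
  intro list_cell max_columns _ hpre
  unfold Spec_get_col_dict
  have hcnt := hpre.2.2.2
  rw [A_eq list_cell max_columns hcnt, B_eq list_cell max_columns hcnt]
  apply List.map_congr_left
  intro p hp
  rw [PySem.List.mem_enumerate_iff] at hp
  obtain ⟨k, hk, rfl⟩ := hp
  have hF : (fullCols (sortCells list_cell)).length ≤ 702 := by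
    unfold fullCols centersFrom
    simp only [List.length_append, List.length_singleton, List.length_map]
    omega
  have hk702 : k < 702 := by
    by_cases hc : max_columns > 0 ∧ ((fullCols (sortCells list_cell)).length : Int) > max_columns
    · rw [if_pos hc] at hk; rw [List.length_take] at hk; omega
    · rw [if_neg hc] at hk; omega
  have h0k : (0 : Int) + (k : Int) = ((k : Nat) : Int) := by omega
  simp only [h0k]
  rw [bkey_eq_colKey k hk702]
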